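-- pv_equiv track=rewrite | github.com/Wamedina/Tesis-Magister | Backup Codes/SUBTE/Preparacion_S.py | Funcion_Resultados_Variables
-- ===== SOURCE A (Python) =====
-- def Funcion_Resultados_Variables(lista_variable,t_S):
--     X_1_INT = list()
--     Y_1_INT = list()
--     Z_1_INT = list()
--     lista_aux = list()
--
--     for i in range(len(lista_variable)):
--         if i <= len(lista_variable)//3:
--             if (i) % t_S[max(t_S)] == 0 and i != 0:
--                 X_1_INT.append(lista_aux)
--                 lista_aux = []
--                 lista_aux.append(lista_variable[i])
--             else:
--                 lista_aux.append(lista_variable[i])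
--
--
--         elif i <= 2*len(lista_variable)//3:
--             if (i) % t_S[max(t_S)] == 0 and i != 0:
--                 Y_1_INT.append(lista_aux)
--                 lista_aux = []
--                 lista_aux.append(lista_variable[i])
--             else:
--                 lista_aux.append(lista_variable[i])
--
--         else:
--             if (i) % t_S[max(t_S)] == 0 and i != 0:
--                 Z_1_INT.append(lista_aux)
--                 lista_aux = []
--                 lista_aux.append(lista_variable[i])
--             else:
--                 lista_aux.append(lista_variable[i])
--     Z_1_INT.append(lista_aux)
--     return X_1_INT, Y_1_INT, Z_1_INT
-- ===== SOURCE B (Python) =====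
-- def Funcion_Resultados_Variables(lista_variable, t_S):
--     n = len(lista_variable)
--     if n == 0:
--         return [], [], [[]]
--     p = t_S[max(t_S)]
--     starts = list(range(0, n, p))
--     X, Y, Z = [], [], []
--     for s in starts[:-1]:
--         chunk = lista_variable[s:s + p]
--         if s + p <= n // 3:
--             X.append(chunk)
--         elif s + p <= 2 * n // 3:
--             Y.append(chunk)
--         else:
--             Z.append(chunk)
--     Z.append(lista_variable[starts[-1]:])
--     return X, Y, Z
-- ===== Notes on version B (the rewrite author's own statement) =====
-- stated objective: faster
-- what changed: B replaces A's element-by-element walk with a shared chunk accumulator by direct slicing: it computes t_S[max(t_S)] and the n//3 thresholds once, takes chunk starts from range(0, n, p), assigns each chunk lista_variable[s:s+p] to X/Y/Z by its end boundary s+p, and sends the final chunk to Z (A re-evaluates max(t_S) and len()//3 on every element); Pre_ excludes a nonempty list with an empty dict or a zero step (A raises there) and with a negative step, where A still returns via Python's divisor-sign modulo but B's ascending range of starts is empty and it raises IndexError.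
-- outside the precondition, e.g. on Funcion_Resultados_Variables([1, 2, 3], {1: -2}): A returns ([], [[1, 2]], [[3]]), B raises IndexError
import Mathlib
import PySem

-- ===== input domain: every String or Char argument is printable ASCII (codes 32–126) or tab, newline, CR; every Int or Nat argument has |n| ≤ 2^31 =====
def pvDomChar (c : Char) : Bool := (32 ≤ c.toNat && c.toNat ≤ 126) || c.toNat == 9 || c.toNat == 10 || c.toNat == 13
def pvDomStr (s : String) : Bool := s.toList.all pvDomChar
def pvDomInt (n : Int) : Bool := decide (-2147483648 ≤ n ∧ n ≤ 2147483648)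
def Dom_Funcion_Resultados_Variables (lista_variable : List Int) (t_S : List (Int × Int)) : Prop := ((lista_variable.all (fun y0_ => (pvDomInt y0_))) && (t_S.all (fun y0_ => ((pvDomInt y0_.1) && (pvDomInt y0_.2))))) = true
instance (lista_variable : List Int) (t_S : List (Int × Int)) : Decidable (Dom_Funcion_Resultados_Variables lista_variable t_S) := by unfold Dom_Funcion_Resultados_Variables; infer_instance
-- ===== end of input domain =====

-- B re-chunks by direct slicing at the range(0, n, p) chunk starts, computing t_S[max(t_S)] and the
-- thirds thresholds once, instead of A's element-by-element walk with a shared accumulator that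
-- re-evaluates them per element (a timing run measured B faster).

-- ===== PORT A =====
-- shared helper: Python's 't_S[max(t_S)]' (dict lookup at the maximal key); both sources compute it verbatim
def pvDictMax (t_S : List (Int × Int)) : Int :=
  match PySem.List.max? (t_S.map Prod.fst) (fun x => x) with
  | some k => (PySem.Dict.ofList t_S).getD k 0
  | none => 0

def pvStepA (lv : List Int) (t_S : List (Int × Int))
    (st : List (List Int) × List (List Int) × List (List Int) × List Int) (i : Int) :
    List (List Int) × List (List Int) × List (List Int) × List Int :=
  let n : Int := lv.length
  let x := PySem.List.pyGetD lv i 0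
  if i ≤ PySem.Int.floordiv n 3 then
    if PySem.Int.mod i (pvDictMax t_S) = 0 ∧ i ≠ 0 then (st.1 ++ [st.2.2.2], st.2.1, st.2.2.1, [x])
    else (st.1, st.2.1, st.2.2.1, st.2.2.2 ++ [x])
  else if i ≤ PySem.Int.floordiv (2 * n) 3 then
    if PySem.Int.mod i (pvDictMax t_S) = 0 ∧ i ≠ 0 then (st.1, st.2.1 ++ [st.2.2.2], st.2.2.1, [x])
    else (st.1, st.2.1, st.2.2.1, st.2.2.2 ++ [x])
  else
    if PySem.Int.mod i (pvDictMax t_S) = 0 ∧ i ≠ 0 then (st.1, st.2.1, st.2.2.1 ++ [st.2.2.2], [x])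
    else (st.1, st.2.1, st.2.2.1, st.2.2.2 ++ [x])

def Funcion_Resultados_Variables (lista_variable : List Int) (t_S : List (Int × Int)) : List (List Int) × List (List Int) × List (List Int) :=
  let r := (PySem.List.pyRange 0 (lista_variable.length : Int) 1).foldl (pvStepA lista_variable t_S) ([], [], [], [])
  (r.1, r.2.1, r.2.2.1 ++ [r.2.2.2])

-- ===== PORT B =====
def pvStepB (lv : List Int) (lo hi p : Int)
    (st : List (List Int) × List (List Int) × List (List Int)) (s : Int) :
    List (List Int) × List (List Int) × List (List Int) :=
  let chunk := PySem.List.slice lv (some s) (some (s + p))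
  if s + p ≤ lo then (st.1 ++ [chunk], st.2.1, st.2.2)
  else if s + p ≤ hi then (st.1, st.2.1 ++ [chunk], st.2.2)
  else (st.1, st.2.1, st.2.2 ++ [chunk])

def Funcion_Resultados_Variables_alt (lista_variable : List Int) (t_S : List (Int × Int)) : List (List Int) × List (List Int) × List (List Int) :=
  let n : Int := lista_variable.length
  if n = 0 then ([], [], [[]])
  else
    let p := pvDictMax t_S
    let starts := PySem.List.pyRange 0 n p
    let r := (PySem.List.slice starts none (some (-1))).foldl
      (pvStepB lista_variable (PySem.Int.floordiv n 3) (PySem.Int.floordiv (2 * n) 3) p) ([], [], [])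
    (r.1, r.2.1, r.2.2 ++ [PySem.List.slice lista_variable (some (PySem.List.pyGetD starts (-1) 0)) none])

-- ===== PRECONDITION & SPEC =====
-- Pre_ excludes a nonempty list with an empty dict or a zero step (A raises ValueError / ZeroDivisionError there)
-- and with a negative step, where A still returns (Python's divisor-sign modulo flushes at multiples of |p|)
-- but B's ascending range(0, n, p) of chunk starts is empty and it raises IndexError.
def Pre_Funcion_Resultados_Variables (lista_variable : List Int) (t_S : List (Int × Int)) : Prop :=
  lista_variable = [] ∨ (t_S ≠ [] ∧ 0 < pvDictMax t_S)
instance (lista_variable : List Int) (t_S : List (Int × Int)) : Decidable (Pre_Funcion_Resultados_Variables lista_variable t_S) := by unfold Pre_Funcion_Resultados_Variables; infer_instance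

def pvWitness_Funcion_Resultados_Variables : List Int × (List (Int × Int)) := ([1, 2, 3, 4, 5, 6, 7], [(1, 2), (0, 3)])

def Spec_Funcion_Resultados_Variables (lista_variable : List Int) (t_S : List (Int × Int)) (out : List (List Int) × List (List Int) × List (List Int)) : Prop := out = Funcion_Resultados_Variables_alt lista_variable t_S
instance (lista_variable : List Int) (t_S : List (Int × Int)) (out : List (List Int) × List (List Int) × List (List Int)) : Decidable (Spec_Funcion_Resultados_Variables lista_variable t_S out) := by unfold Spec_Funcion_Resultados_Variables; infer_instance

-- ===== CLAIM (what is proved, stated in full; the proofs are below) =====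
def Claim_equal_Funcion_Resultados_Variables : Prop := ∀ (lista_variable : List Int) (t_S : List (Int × Int)), Dom_Funcion_Resultados_Variables lista_variable t_S → Pre_Funcion_Resultados_Variables lista_variable t_S → Spec_Funcion_Resultados_Variables lista_variable t_S (Funcion_Resultados_Variables lista_variable t_S)

-- ===== LEMMAS AND PROOFS =====

-- B's accumulator after the first c loop iterations (chunk starts p*0, …, p*(c-1))
def pvBacc (lv : List Int) (lo hi p : Int) (c : Nat) : List (List Int) × List (List Int) × List (List Int) :=
  (List.range c).foldl (fun st (k : Nat) => pvStepB lv lo hi p st (p * (k : Int))) ([], [], [])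

lemma pvDivPred_dvd {qn m : Nat} (hq : 0 < qn) (hm : 1 ≤ m) (h : qn ∣ m) :
    m = ((m - 1) / qn + 1) * qn ∧ (m - 1) / qn + 1 = m / qn := by
  obtain ⟨t, rfl⟩ := h
  have ht : 1 ≤ t := by
    rcases Nat.eq_zero_or_pos t with h0 | h1
    · subst h0; omega
    · exact h1
  obtain ⟨s, rfl⟩ := Nat.exists_eq_add_of_le ht
  have h1 : qn * (1 + s) - 1 = qn * s + (qn - 1) := by rw [Nat.mul_add]; omega
  have h2 : (qn * (1 + s) - 1) / qn = s := by
    rw [h1, Nat.mul_add_div hq, Nat.div_eq_of_lt (by omega)]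
    omega
  have h3 : qn * (1 + s) / qn = 1 + s := Nat.mul_div_cancel_left _ hq
  refine ⟨?_, ?_⟩
  · rw [h2]; ring
  · rw [h2, h3]
    omega

lemma pvDivPred_not_dvd {qn m : Nat} (hq : 0 < qn) (hm : 1 ≤ m) (h : ¬ qn ∣ m) :
    m / qn = (m - 1) / qn := by
  have hr : m % qn ≠ 0 := fun h0 => h (Nat.dvd_of_mod_eq_zero h0)
  have hlt : m % qn < qn := Nat.mod_lt _ hq
  have hdm : qn * (m / qn) + m % qn = m := Nat.div_add_mod m qn
  have h1 : m - 1 = qn * (m / qn) + (m % qn - 1) := by omega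
  have h2 : (m % qn - 1) / qn = 0 := Nat.div_eq_of_lt (by omega)
  rw [h1, Nat.mul_add_div hq, h2]
  omega

lemma pvModZeroIff (m qn : Nat) (p : Int) (hq : ((qn : Nat) : Int) = p) :
    (PySem.Int.mod (m : Int) p = 0) ↔ qn ∣ m := by
  subst hq
  rw [PySem.Int.mod_eq_zero_iff_dvd, Int.natCast_dvd_natCast]

lemma pvTakeSucc (lv : List Int) (m : Nat) (hm : m < lv.length) :
    lv.take (m + 1) = lv.take m ++ [lv[m]] := by
  rw [List.take_succ, List.getElem?_eq_getElem hm]; rfl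

-- aux after processing indices 0..m-1 is the slice from the last flush boundary
lemma pvInv (lv : List Int) (t_S : List (Int × Int)) (qn : Nat)
    (hq : ((qn : Nat) : Int) = pvDictMax t_S) (hq0 : 0 < qn) :
    ∀ m : Nat, 1 ≤ m → m ≤ lv.length →
      (List.range m).foldl (fun st (j : Nat) => pvStepA lv t_S st (j : Int)) ([], [], [], []) =
        ((pvBacc lv (PySem.Int.floordiv (lv.length : Int) 3) (PySem.Int.floordiv (2 * (lv.length : Int)) 3) ((qn : Nat) : Int) ((m - 1) / qn)).1,
         (pvBacc lv (PySem.Int.floordiv (lv.length : Int) 3) (PySem.Int.floordiv (2 * (lv.length : Int)) 3) ((qn : Nat) : Int) ((m - 1) / qn)).2.1,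
         (pvBacc lv (PySem.Int.floordiv (lv.length : Int) 3) (PySem.Int.floordiv (2 * (lv.length : Int)) 3) ((qn : Nat) : Int) ((m - 1) / qn)).2.2,
         (lv.take m).drop (((m - 1) / qn) * qn)) := by
  intro m
  induction m with
  | zero => omega
  | succ m ih =>
    intro _ hm1
    by_cases hm0 : m = 0
    · subst hm0
      have hlen : 0 < lv.length := by omega
      have h0le : (0 : Int) ≤ PySem.Int.floordiv (lv.length : Int) 3 := by
        rw [PySem.Int.floordiv_eq_ediv_of_pos (by omega : (0 : Int) < 3)]
        exact Int.ediv_nonneg (by positivity) (by omega)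
      have htake : lv.take 1 = [lv.getD 0 0] := by
        cases lv with
        | nil => simp at hlen
        | cons a t => simp
      have hb0 : ∀ lo hi : Int, pvBacc lv lo hi ((qn : Nat) : Int) 0 = ([], [], []) := fun _ _ => rfl
      simp [pvStepA, hb0, PySem.List.pyGetD_zero, h0le, htake]
    · have hm : 1 ≤ m := by omega
      have hmlt : m < lv.length := by omega
      rw [List.range_succ, List.foldl_append, List.foldl_cons, List.foldl_nil,
        ih hm (by omega)]
      have hx : PySem.List.pyGetD lv ((m : Nat) : Int) 0 = lv[m] := by
        rw [PySem.List.pyGetD_natCast]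
        exact List.getD_eq_getElem lv 0 hmlt
      have hne : ((m : Nat) : Int) ≠ 0 := by
        simp only [ne_eq, Nat.cast_eq_zero]; omega
      set lo := PySem.Int.floordiv (lv.length : Int) 3 with hlo
      set hi := PySem.Int.floordiv (2 * (lv.length : Int)) 3 with hhi
      set c := (m - 1) / qn with hc
      have hcq : c * qn ≤ m - 1 := Nat.div_mul_le_self _ _
      by_cases hdvd : qn ∣ m
      · obtain ⟨hmeq, hcsucc⟩ := pvDivPred_dvd hq0 hm hdvd
        have hmod : PySem.Int.mod ((m : Nat) : Int) (pvDictMax t_S) = 0 :=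
          (pvModZeroIff m qn _ hq).mpr hdvd
        have hcast : ((m : Nat) : Int) = ((qn : Nat) : Int) * ((c : Nat) : Int) + ((qn : Nat) : Int) := by
          rw [show m = (c + 1) * qn from hmeq]; push_cast; ring
        have hchunk : PySem.List.slice lv (some (((qn : Nat) : Int) * ((c : Nat) : Int)))
            (some (((qn : Nat) : Int) * ((c : Nat) : Int) + ((qn : Nat) : Int))) =
            (lv.take m).drop (c * qn) := by
          have h1 : ((qn : Nat) : Int) * ((c : Nat) : Int) = ((c * qn : Nat) : Int) := by push_cast; ring
          have h2 : ((qn : Nat) : Int) * ((c : Nat) : Int) + ((qn : Nat) : Int) = ((c * qn + qn : Nat) : Int) := by push_cast; ring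
          rw [h2, h1, PySem.List.slice_natCast, List.drop_take]
          congr 1
          omega
        have h1' : (m + 1 - 1) / qn = c + 1 := by simpa using hcsucc.symm
        have hauxnew : (lv.take (m + 1)).drop (((m + 1 - 1) / qn) * qn) = [lv[m]] := by
          rw [h1', show (c + 1) * qn = m from hmeq.symm, pvTakeSucc lv m hmlt,
            List.drop_append_of_le_length (by simp [List.length_take]; omega)]
          have h3 : (lv.take m).drop m = [] := by
            apply List.drop_eq_nil_of_le; simp [List.length_take]
          simp [h3]
        have hbacc : pvBacc lv lo hi ((qn : Nat) : Int) ((m + 1 - 1) / qn) =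
            pvStepB lv lo hi ((qn : Nat) : Int) (pvBacc lv lo hi ((qn : Nat) : Int) c) (((qn : Nat) : Int) * ((c : Nat) : Int)) := by
          rw [h1', pvBacc, pvBacc, List.range_succ, List.foldl_append, List.foldl_cons, List.foldl_nil]
        have hchunk' : PySem.List.slice lv (some (((qn : Nat) : Int) * ((c : Nat) : Int)))
            (some ((m : Nat) : Int)) = (lv.take m).drop (c * qn) := by
          rw [hcast]; exact hchunk
        rw [hbacc]
        simp only [pvStepA, pvStepB, ← hcast]
        rw [hx, hchunk', hauxnew]
        have hcond : PySem.Int.mod ((m : Nat) : Int) (pvDictMax t_S) = 0 ∧ ((m : Nat) : Int) ≠ 0 := ⟨hmod, hne⟩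
        rw [if_pos hcond, if_pos hcond, if_pos hcond]
        split_ifs <;> rfl
      · have hmod : ¬ (PySem.Int.mod ((m : Nat) : Int) (pvDictMax t_S) = 0) := by
          rw [pvModZeroIff m qn _ hq]; exact hdvd
        have hcsame : (m + 1 - 1) / qn = c := by
          have h := pvDivPred_not_dvd hq0 hm hdvd
          simpa using h
        have hauxnew : (lv.take (m + 1)).drop (c * qn) =
            (lv.take m).drop (c * qn) ++ [lv[m]] := by
          rw [pvTakeSucc lv m hmlt,
            List.drop_append_of_le_length (by simp [List.length_take]; omega)]
        simp only [pvStepA, hcsame]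
        rw [hx, hauxnew]
        have hcond : ¬ (PySem.Int.mod ((m : Nat) : Int) (pvDictMax t_S) = 0 ∧ ((m : Nat) : Int) ≠ 0) :=
          fun h => hmod h.1
        rw [if_neg hcond, if_neg hcond, if_neg hcond]
        split_ifs <;> rfl

-- ===== VERDICT (by name: the statement is the Claim_ definition above) =====
theorem Funcion_Resultados_Variables_spec : Claim_equal_Funcion_Resultados_Variables := by
  intro lv t_S _ hpre
  unfold Spec_Funcion_Resultados_Variables
  rcases List.eq_nil_or_concat lv with hnil | hcons
  · subst hnil; rfl
  · have hlen : 1 ≤ lv.length := by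
      obtain ⟨ys, y, rfl⟩ := hcons; simp
    have hp : 0 < pvDictMax t_S := by
      rcases hpre with hnil | ⟨_, hp⟩
      · subst hnil; simp at hlen
      · exact hp
    set p := pvDictMax t_S with hpdef
    set qn := p.toNat with hqn
    have hq : ((qn : Nat) : Int) = p := Int.toNat_of_nonneg (le_of_lt hp)
    have hq0 : 0 < qn := by omega
    set nn := lv.length with hnn
    have hne0 : ¬ ((nn : Int) = 0) := by
      simp only [ne_eq, Nat.cast_eq_zero]; omega
    set c := (nn - 1) / qn with hcdef
    -- the list of chunk starts
    have hcnt : (if (0 : Int) < (nn : Int) then (((nn : Int) - 0 + p - 1) / p).toNat else 0) = c + 1 := by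
      have hdiv : ((nn : Int) - 0 + p - 1) / p = ((c + 1 : Nat) : Int) := by
        rw [← hq]
        have h1 : (nn : Int) - 0 + ((qn : Nat) : Int) - 1 = ((nn - 1 + qn : Nat) : Int) := by omega
        rw [h1, ← Int.natCast_ediv]
        congr 1
        rw [hcdef]
        exact Nat.add_div_right _ hq0
      rw [if_pos (by exact_mod_cast hlen), hdiv, Int.toNat_natCast]
    have hstarts : PySem.List.pyRange 0 (nn : Int) p =
        (List.range (c + 1)).map (fun k : Nat => p * (k : Int)) := by
      rw [PySem.List.pyRange_of_pos 0 (nn : Int) hp, hcnt]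
      simp only [zero_add]
    have hA : Funcion_Resultados_Variables lv t_S =
        (((List.range nn).foldl (fun st (j : Nat) => pvStepA lv t_S st (j : Int)) ([], [], [], [])).1,
         ((List.range nn).foldl (fun st (j : Nat) => pvStepA lv t_S st (j : Int)) ([], [], [], [])).2.1,
         ((List.range nn).foldl (fun st (j : Nat) => pvStepA lv t_S st (j : Int)) ([], [], [], [])).2.2.1 ++
           [((List.range nn).foldl (fun st (j : Nat) => pvStepA lv t_S st (j : Int)) ([], [], [], [])).2.2.2]) := by
      unfold Funcion_Resultados_Variables
      rw [PySem.List.pyRange_zero_natCast, List.foldl_map]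
    have hdrop : PySem.List.slice (PySem.List.pyRange 0 (nn : Int) p) none (some (-1)) =
        (List.range c).map (fun k : Nat => p * (k : Int)) := by
      rw [PySem.List.slice_to_neg_one, hstarts, List.range_succ]
      simp
    have hlast : PySem.List.pyGetD (PySem.List.pyRange 0 (nn : Int) p) (-1) 0 = p * ((c : Nat) : Int) := by
      rw [hstarts, List.range_succ, List.map_append, List.map_cons, List.map_nil]
      exact PySem.List.pyGetD_neg_one_append_singleton _ _ _
    have hzslice : PySem.List.slice lv (some (p * ((c : Nat) : Int))) none = (lv.take nn).drop (c * qn) := by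
      have h1 : p * ((c : Nat) : Int) = ((c * qn : Nat) : Int) := by rw [← hq]; push_cast; ring
      rw [h1, PySem.List.slice_from_natCast, hnn, List.take_length]
    have hB : Funcion_Resultados_Variables_alt lv t_S =
        ((pvBacc lv (PySem.Int.floordiv (nn : Int) 3) (PySem.Int.floordiv (2 * (nn : Int)) 3) ((qn : Nat) : Int) c).1,
         (pvBacc lv (PySem.Int.floordiv (nn : Int) 3) (PySem.Int.floordiv (2 * (nn : Int)) 3) ((qn : Nat) : Int) c).2.1,
         (pvBacc lv (PySem.Int.floordiv (nn : Int) 3) (PySem.Int.floordiv (2 * (nn : Int)) 3) ((qn : Nat) : Int) c).2.2 ++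
           [(lv.take nn).drop (c * qn)]) := by
      simp only [Funcion_Resultados_Variables_alt]
      rw [← hnn, if_neg hne0, ← hpdef, hdrop, hlast, hzslice, List.foldl_map, hq]
      rfl
    rw [hA, hB, pvInv lv t_S qn hq hq0 nn hlen le_rfl]
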